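-- pv_equiv track=rewrite | github.com/gwsoft/py.check.io | Elementary/Elementary.py | is_all_upper
-- ===== SOURCE A (Python) =====
-- import string
--
-- def is_all_upper(text: str) -> bool:
-- 	allowed_letters = string.ascii_uppercase + ' ' + string.digits
-- 	res = True
-- 	for i in range(0, len(text)):
-- 		if text[i] not in allowed_letters:
-- 			res = False
-- 			break
-- 	return res
-- ===== SOURCE B (Python) =====
-- import re
--
-- def is_all_upper(text: str) -> bool:
--     return re.fullmatch(r'[A-Z0-9 ]*', text) is not None
-- ===== Notes on version B (the rewrite author's own statement) =====
-- stated objective: idiomatic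
-- what changed: Replaced the manual index loop with break over a concatenated allowed-characters string by a single regex fullmatch against the character class [A-Z0-9 ]*.
import Mathlib
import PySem

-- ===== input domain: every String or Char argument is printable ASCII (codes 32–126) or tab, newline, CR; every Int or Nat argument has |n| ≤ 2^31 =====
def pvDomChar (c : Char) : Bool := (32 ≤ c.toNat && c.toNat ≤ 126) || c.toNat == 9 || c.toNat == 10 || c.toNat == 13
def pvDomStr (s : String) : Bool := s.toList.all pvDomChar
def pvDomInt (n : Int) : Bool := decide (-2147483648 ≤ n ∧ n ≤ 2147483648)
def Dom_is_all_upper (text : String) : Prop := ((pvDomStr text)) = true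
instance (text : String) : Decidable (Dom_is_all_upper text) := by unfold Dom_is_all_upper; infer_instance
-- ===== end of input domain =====

-- B replaces A's index loop (with break) over a concatenated allowed-chars string by a
-- single regex fullmatch against the class [A-Z0-9 ]* (more idiomatic; same result).
-- ===== PORT A =====
-- allowed_letters = string.ascii_uppercase + ' ' + string.digits
def pvAllowedLetters : List Char := "ABCDEFGHIJKLMNOPQRSTUVWXYZ 0123456789".toList

-- the for-loop over i in range(0, len(text)) with res/break, as structural recursion
-- over the characters in order
def pvLoopA : List Char → Bool
  | [] => true
  | c :: rest => if (pvAllowedLetters.contains c) = false then false else pvLoopA rest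

def is_all_upper (text : String) : Bool := pvLoopA text.toList

-- ===== PORT B =====
-- re.fullmatch(r'[A-Z0-9 ]*', text) is not None: every character matches the class
-- [A-Z0-9 ] (the three ranges/char of the class, tested directly; exact for this regex)
def pvMatchesClass (c : Char) : Bool :=
  ('A' ≤ c && c ≤ 'Z') || ('0' ≤ c && c ≤ '9') || c == ' '

def is_all_upper_alt (text : String) : Bool := text.toList.all pvMatchesClass

-- ===== PRECONDITION & SPEC =====
def Spec_is_all_upper (text : String) (out : Bool) : Prop := out = is_all_upper_alt text
instance (text : String) (out : Bool) : Decidable (Spec_is_all_upper text out) := by unfold Spec_is_all_upper; infer_instance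

-- ===== CLAIM (what is proved, stated in full; the proofs are below) =====
def Claim_equal_is_all_upper : Prop := ∀ (text : String), Dom_is_all_upper text → Spec_is_all_upper text (is_all_upper text)

-- ===== LEMMAS AND PROOFS =====
theorem char_eq_iff_toNat (c d : Char) : c = d ↔ c.toNat = d.toNat :=
  ⟨fun h => h ▸ rfl, fun h => Char.ext (UInt32.toNat_inj.mp h)⟩

-- membership in A's concatenated allowed string coincides with B's character class
theorem pvMem_eq (c : Char) : pvAllowedLetters.contains c = pvMatchesClass c := by
  rw [Bool.eq_iff_iff]
  have h1 : pvAllowedLetters.contains c = true ↔ c ∈ pvAllowedLetters :=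
    List.contains_iff_mem
  rw [h1]
  have h2 : pvAllowedLetters = ['A','B','C','D','E','F','G','H','I','J','K','L','M','N','O','P','Q','R','S','T','U','V','W','X','Y','Z',' ','0','1','2','3','4','5','6','7','8','9'] := rfl
  rw [h2]
  simp only [List.mem_cons, List.not_mem_nil, or_false, char_eq_iff_toNat,
    pvMatchesClass, Bool.or_eq_true, Bool.and_eq_true, decide_eq_true_eq,
    Char.le_def, UInt32.le_iff_toNat_le, beq_iff_eq]
  have hv : c.val.toNat = c.toNat := rfl
  rw [hv]
  simp only [show ('A':Char).toNat = 65 from rfl,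
    show ('B':Char).toNat = 66 from rfl,
    show ('C':Char).toNat = 67 from rfl,
    show ('D':Char).toNat = 68 from rfl,
    show ('E':Char).toNat = 69 from rfl,
    show ('F':Char).toNat = 70 from rfl,
    show ('G':Char).toNat = 71 from rfl,
    show ('H':Char).toNat = 72 from rfl,
    show ('I':Char).toNat = 73 from rfl,
    show ('J':Char).toNat = 74 from rfl,
    show ('K':Char).toNat = 75 from rfl,
    show ('L':Char).toNat = 76 from rfl,
    show ('M':Char).toNat = 77 from rfl,
    show ('N':Char).toNat = 78 from rfl,
    show ('O':Char).toNat = 79 from rfl,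
    show ('P':Char).toNat = 80 from rfl,
    show ('Q':Char).toNat = 81 from rfl,
    show ('R':Char).toNat = 82 from rfl,
    show ('S':Char).toNat = 83 from rfl,
    show ('T':Char).toNat = 84 from rfl,
    show ('U':Char).toNat = 85 from rfl,
    show ('V':Char).toNat = 86 from rfl,
    show ('W':Char).toNat = 87 from rfl,
    show ('X':Char).toNat = 88 from rfl,
    show ('Y':Char).toNat = 89 from rfl,
    show ('Z':Char).toNat = 90 from rfl,
    show (' ':Char).toNat = 32 from rfl,
    show ('0':Char).toNat = 48 from rfl,
    show ('1':Char).toNat = 49 from rfl,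
    show ('2':Char).toNat = 50 from rfl,
    show ('3':Char).toNat = 51 from rfl,
    show ('4':Char).toNat = 52 from rfl,
    show ('5':Char).toNat = 53 from rfl,
    show ('6':Char).toNat = 54 from rfl,
    show ('7':Char).toNat = 55 from rfl,
    show ('8':Char).toNat = 56 from rfl,
    show ('9':Char).toNat = 57 from rfl,
    show ('A':Char).val.toNat = 65 from rfl,
    show ('Z':Char).val.toNat = 90 from rfl,
    show ('0':Char).val.toNat = 48 from rfl,
    show ('9':Char).val.toNat = 57 from rfl]
  omega

theorem pvLoopA_eq_all (cs : List Char) : pvLoopA cs = cs.all pvMatchesClass := by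
  induction cs with
  | nil => rfl
  | cons c rest ih =>
    simp only [pvLoopA, List.all_cons, pvMem_eq]
    cases pvMatchesClass c <;> simp [ih]

-- ===== VERDICT (by name: the statement is the Claim_ definition above) =====
theorem is_all_upper_spec : Claim_equal_is_all_upper := by
  intro text _
  unfold Spec_is_all_upper is_all_upper is_all_upper_alt
  exact pvLoopA_eq_all text.toList
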